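-- pv_equiv track=rewrite | github.com/sophiaalthammer/tripjudge | preprocessing/trip_preprocessing.py | run_intersection
-- ===== SOURCE A (Python) =====
-- def get_pairs_from_run(run):
--     run_pairs_cutoff = []
--     for query_id, value in run.items():
--         for doc_id, rank in value.items():
--             run_pairs_cutoff.append((query_id, doc_id))
--     return run_pairs_cutoff
--
-- def run_intersection(run_scibert, run_bertcat, cut_off):
--     run_scibert = run_cut_off(run_scibert, cut_off)
--     run_bertcat = run_cut_off(run_bertcat, cut_off)
--
--     run_pairs_scibert = get_pairs_from_run(run_scibert)
--     run_pairs_bertcat = get_pairs_from_run(run_bertcat)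
--
--     run_scibert_intersect = list(set(run_pairs_scibert).intersection(set(run_pairs_bertcat)))
--
--     # remove the pairs from the intersection from bertcat
--     # keep the pair where it has the highest ranking!
--     for (query_id, doc_id) in run_scibert_intersect:
--         rank_scibert = run_scibert.get(query_id).get(doc_id)
--         rank_bertcat = run_bertcat.get(query_id).get(doc_id)
--         if rank_scibert <= rank_bertcat:
--             run_bertcat.get(query_id).pop(doc_id)
--         else:
--             run_scibert.get(query_id).pop(doc_id)
--     return run_scibert, run_bertcat
--
-- def run_cut_off(run, cut_off):
--     run_cutted = {}
--     for query_id, value in run.items():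
--         run_cutted.update({query_id:{}})
--         for doc_id, rank in value.items():
--             if rank <= cut_off:
--                 run_cutted.get(query_id).update({doc_id:rank})
--     return run_cutted
-- ===== SOURCE B (Python) =====
-- def run_intersection(run_scibert, run_bertcat, cut_off):
--     # single pass over scibert's pairs with direct membership checks in bertcat;
--     # no pair lists, no set intersection
--     run_scibert = {q: {d: r for d, r in v.items() if r <= cut_off}
--                    for q, v in run_scibert.items()}
--     run_bertcat = {q: {d: r for d, r in v.items() if r <= cut_off}
--                    for q, v in run_bertcat.items()}
--     for query_id, docs in list(run_scibert.items()):
--         other = run_bertcat.get(query_id)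
--         if other is None:
--             continue
--         for doc_id, rank_scibert in list(docs.items()):
--             if doc_id in other:
--                 if rank_scibert <= other[doc_id]:
--                     other.pop(doc_id)
--                 else:
--                     docs.pop(doc_id)
--     return run_scibert, run_bertcat
-- ===== Notes on version B (the rewrite author's own statement) =====
-- stated objective: simpler
-- what changed: B drops get_pairs_from_run and the set intersection entirely: after cutting both runs (done with dict comprehensions instead of A's nested update loops) it makes one pass over a snapshot of run_scibert's items, checks each (query_id, doc_id) directly for membership in run_bertcat, and pops from one side with the same '<=' rule.
import Mathlib
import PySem

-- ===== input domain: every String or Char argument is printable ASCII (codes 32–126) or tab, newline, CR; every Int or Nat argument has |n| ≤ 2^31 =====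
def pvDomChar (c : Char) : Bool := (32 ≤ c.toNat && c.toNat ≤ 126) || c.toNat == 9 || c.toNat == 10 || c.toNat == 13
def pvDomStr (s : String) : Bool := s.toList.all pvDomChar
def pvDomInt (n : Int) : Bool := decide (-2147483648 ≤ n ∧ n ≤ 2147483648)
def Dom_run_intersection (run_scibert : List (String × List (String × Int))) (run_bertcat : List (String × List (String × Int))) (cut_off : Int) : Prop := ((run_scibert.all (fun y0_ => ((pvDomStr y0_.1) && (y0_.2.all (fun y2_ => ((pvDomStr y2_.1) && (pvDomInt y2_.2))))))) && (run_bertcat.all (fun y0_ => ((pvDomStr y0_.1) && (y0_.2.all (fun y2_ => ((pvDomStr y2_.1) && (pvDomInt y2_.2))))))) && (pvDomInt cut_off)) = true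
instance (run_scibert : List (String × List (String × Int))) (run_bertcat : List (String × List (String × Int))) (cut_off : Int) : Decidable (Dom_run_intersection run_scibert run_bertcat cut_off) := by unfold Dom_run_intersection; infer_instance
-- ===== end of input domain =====

-- B replaces A's pair-list extraction + set intersection by one direct pass over the cut-off
-- scibert dict with membership checks in bertcat (objective: simpler); return value only — the
-- Python functions rebind their parameters, the callers' dicts are not mutated.

-- the dict[str, dict[str, int]] arguments arrive as association lists; both ports read them as
-- dicts exactly as Python's dict construction does (later duplicate keys overwrite)
abbrev pvD2 := PySem.Dict String (PySem.Dict String Int)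

def pvRunDict (run : List (String × List (String × Int))) : pvD2 :=
  PySem.Dict.ofList (run.map (fun p => (p.1, PySem.Dict.ofList p.2)))

def pvRunList (d : pvD2) : List (String × List (String × Int)) :=
  d.items.map (fun p => (p.1, p.2.items))

-- ===== PORT A =====
def run_cut_off (run : pvD2) (cut_off : Int) : pvD2 :=
  run.items.foldl
    (fun run_cutted qv =>
      -- run_cutted.update({query_id: {}})
      let run_cutted := run_cutted.insert qv.1 PySem.Dict.empty
      -- run_cutted.get(query_id).update({doc_id: rank}) mutates the inner dict at qv.1;
      -- the key qv.1 is present, so modify with default {} is exact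
      qv.2.items.foldl
        (fun run_cutted dr =>
          if dr.2 ≤ cut_off then
            run_cutted.modify qv.1 PySem.Dict.empty (fun inn => inn.insert dr.1 dr.2)
          else run_cutted)
        run_cutted)
    PySem.Dict.empty

def get_pairs_from_run (run : pvD2) : List (String × String) :=
  run.items.foldl
    (fun run_pairs_cutoff qv =>
      qv.2.items.foldl (fun run_pairs_cutoff dr => run_pairs_cutoff ++ [(qv.1, dr.1)])
        run_pairs_cutoff)
    []

-- body of A's 'for (query_id, doc_id) in run_scibert_intersect' loop; on every intersection
-- pair both .get chains succeed, so the '| _, _' arm is unreachable there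
def pvStepA (st : pvD2 × pvD2) (qd : String × String) : pvD2 × pvD2 :=
  match (st.1.getD qd.1 PySem.Dict.empty).get? qd.2, (st.2.getD qd.1 PySem.Dict.empty).get? qd.2 with
  | some rank_scibert, some rank_bertcat =>
    if rank_scibert ≤ rank_bertcat then
      -- run_bertcat.get(query_id).pop(doc_id)
      (st.1, st.2.modify qd.1 PySem.Dict.empty (fun inn => inn.erase qd.2))
    else
      -- run_scibert.get(query_id).pop(doc_id)
      (st.1.modify qd.1 PySem.Dict.empty (fun inn => inn.erase qd.2), st.2)
  | _, _ => st

def run_intersection (run_scibert : List (String × List (String × Int))) (run_bertcat : List (String × List (String × Int))) (cut_off : Int) : (List (String × List (String × Int))) × (List (String × List (String × Int))) :=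
  let run_scibert' := run_cut_off (pvRunDict run_scibert) cut_off
  let run_bertcat' := run_cut_off (pvRunDict run_bertcat) cut_off
  let run_pairs_scibert := get_pairs_from_run run_scibert'
  let run_pairs_bertcat := get_pairs_from_run run_bertcat'
  let run_scibert_intersect :=
    PySem.Set.inter (PySem.Set.ofList run_pairs_scibert) (PySem.Set.ofList run_pairs_bertcat)
  -- Python iterates this set in hash order; every iteration pops a distinct pair reading ranks
  -- untouched by the other iterations, so the resulting dicts do not depend on that order
  let st := run_scibert_intersect.foldl pvStepA (run_scibert', run_bertcat')
  (pvRunList st.1, pvRunList st.2)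

-- ===== PORT B =====
-- {q: {d: r for d, r in v.items() if r <= cut_off} for q, v in run.items()}
def pvCutRun (run : pvD2) (cut_off : Int) : pvD2 :=
  run.items.foldl
    (fun acc qv =>
      acc.insert qv.1
        (qv.2.items.foldl (fun inn dr => if dr.2 ≤ cut_off then inn.insert dr.1 dr.2 else inn)
          PySem.Dict.empty))
    PySem.Dict.empty

-- body of B's inner loop: 'other' is the live run_bertcat[query_id]; docs.pop goes through st.1
def pvStepB (query_id : String) (st : pvD2 × pvD2) (dr : String × Int) : pvD2 × pvD2 :=
  -- 'other' is the live run_bertcat[query_id], read from the current state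
  match (st.2.getD query_id PySem.Dict.empty).get? dr.1 with
  | some rank_bertcat =>
    if dr.2 ≤ rank_bertcat then
      (st.1, st.2.insert query_id ((st.2.getD query_id PySem.Dict.empty).erase dr.1))
    else (st.1.insert query_id ((st.1.getD query_id PySem.Dict.empty).erase dr.1), st.2)
  | none => st

def run_intersection_alt (run_scibert : List (String × List (String × Int))) (run_bertcat : List (String × List (String × Int))) (cut_off : Int) : (List (String × List (String × Int))) × (List (String × List (String × Int))) :=
  let run_scibert' := pvCutRun (pvRunDict run_scibert) cut_off
  let run_bertcat' := pvCutRun (pvRunDict run_bertcat) cut_off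
  let st :=
    run_scibert'.items.foldl
      (fun st qdocs =>
        -- other = run_bertcat.get(query_id); None → continue
        match st.2.get? qdocs.1 with
        | none => st
        | some _ => qdocs.2.items.foldl (pvStepB qdocs.1) st)
      (run_scibert', run_bertcat')
  (pvRunList st.1, pvRunList st.2)

-- ===== PRECONDITION & SPEC =====
def Spec_run_intersection (run_scibert : List (String × List (String × Int))) (run_bertcat : List (String × List (String × Int))) (cut_off : Int) (out : (List (String × List (String × Int))) × (List (String × List (String × Int)))) : Prop := out = run_intersection_alt run_scibert run_bertcat cut_off
instance (run_scibert : List (String × List (String × Int))) (run_bertcat : List (String × List (String × Int))) (cut_off : Int) (out : (List (String × List (String × Int))) × (List (String × List (String × Int)))) : Decidable (Spec_run_intersection run_scibert run_bertcat cut_off out) := by unfold Spec_run_intersection; infer_instance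

-- ===== CLAIM (what is proved, stated in full; the proofs are below) =====
def Claim_equal_run_intersection : Prop := ∀ (run_scibert : List (String × List (String × Int))) (run_bertcat : List (String × List (String × Int))) (cut_off : Int), Dom_run_intersection run_scibert run_bertcat cut_off → Spec_run_intersection run_scibert run_bertcat cut_off (run_intersection run_scibert run_bertcat cut_off)

-- ===== LEMMAS AND PROOFS =====

-- pairs / triples of a nested dict, in iteration order
def pvPairs (S : pvD2) : List (String × String) :=
  S.items.flatMap (fun qv => qv.2.items.map (fun dr => (qv.1, dr.1)))

def pvTriples (S : pvD2) : List ((String × String) × Int) :=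
  S.items.flatMap (fun qv => qv.2.items.map (fun dr => ((qv.1, dr.1), dr.2)))

-- the common step, reading the ranks from the FIXED post-cutoff dicts S and B
def pvStep (S B : pvD2) (st : pvD2 × pvD2) (qd : String × String) : pvD2 × pvD2 :=
  match (S.getD qd.1 PySem.Dict.empty).get? qd.2, (B.getD qd.1 PySem.Dict.empty).get? qd.2 with
  | some rank_scibert, some rank_bertcat =>
    if rank_scibert ≤ rank_bertcat then
      (st.1, st.2.insert qd.1 ((st.2.getD qd.1 PySem.Dict.empty).erase qd.2))
    else
      (st.1.insert qd.1 ((st.1.getD qd.1 PySem.Dict.empty).erase qd.2), st.2)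
  | _, _ => st

-- B's inner step with the rank read from the fixed B
def pvStepB' (B : pvD2) (st : pvD2 × pvD2) (t : (String × String) × Int) : pvD2 × pvD2 :=
  match (B.getD t.1.1 PySem.Dict.empty).get? t.1.2 with
  | some rank_bertcat =>
    if t.2 ≤ rank_bertcat then (st.1, st.2.insert t.1.1 ((st.2.getD t.1.1 PySem.Dict.empty).erase t.1.2))
    else (st.1.insert t.1.1 ((st.1.getD t.1.1 PySem.Dict.empty).erase t.1.2), st.2)
  | none => st

theorem pv_find?_filter {ν : Type} (l : List (String × ν)) (k k' : String) :
    (l.filter (fun p => !(p.1 == k))).find? (fun p => p.1 == k') =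
      if k' = k then none else l.find? (fun p => p.1 == k') := by
  induction l with
  | nil => simp
  | cons p l ih =>
    by_cases hk : p.1 = k
    · rw [List.filter_cons_of_neg (by simp [hk]), ih]
      by_cases h' : k' = k
      · simp [h']
      · rw [if_neg h', if_neg h']
        exact (List.find?_cons_of_neg (by simp [hk]; exact fun hh => h' hh.symm)).symm
    · rw [List.filter_cons_of_pos (by simp [hk])]
      by_cases h' : p.1 = k'
      · have hne : k' ≠ k := fun hh => hk (h'.trans hh)
        rw [List.find?_cons_of_pos (by simp [h']), if_neg hne,
          List.find?_cons_of_pos (by simp [h'])]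
      · rw [List.find?_cons_of_neg (by simp [h']), ih]
        by_cases h'' : k' = k
        · simp [h'']
        · rw [if_neg h'', if_neg h'', List.find?_cons_of_neg (by simp [h'])]

theorem pv_get?_erase {ν : Type} (d : PySem.Dict String ν) (k k' : String) :
    (d.erase k).get? k' = if k' = k then none else d.get? k' := by
  show Option.map (fun x => x.2)
      ((d.items.filter (fun p => !(p.1 == k))).find? (fun p => p.1 == k'))
    = if k' = k then none else d.get? k'
  rw [pv_find?_filter]
  split <;> rfl

-- effect of erasing one inner key on every nested read
theorem pv_get2_insert_erase (d : pvD2) (q k q' k' : String) :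
    ((d.insert q ((d.getD q PySem.Dict.empty).erase k)).getD q' PySem.Dict.empty).get? k' =
      if q' = q ∧ k' = k then none
      else (d.getD q' PySem.Dict.empty).get? k' := by
  by_cases hq : q' = q
  · subst hq
    rw [PySem.Dict.getD_insert_self, pv_get?_erase]
    by_cases hk : k' = k <;> simp [hk]
  · rw [PySem.Dict.getD_insert]
    simp [hq]

theorem pvStep_fst_read (S B : pvD2) (st : pvD2 × pvD2) (p x : String × String) (hne : x ≠ p) :
    (((pvStep S B st p).1.getD x.1 PySem.Dict.empty).get? x.2) =
      ((st.1.getD x.1 PySem.Dict.empty).get? x.2) := by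
  have hpair : ¬(x.1 = p.1 ∧ x.2 = p.2) := by
    rintro ⟨h1, h2⟩; exact hne (Prod.ext h1 h2)
  unfold pvStep
  cases hS : (S.getD p.1 PySem.Dict.empty).get? p.2 <;>
    cases hB : (B.getD p.1 PySem.Dict.empty).get? p.2 <;> simp
  split
  · rfl
  · simp [pv_get2_insert_erase, hpair]

theorem pvStep_snd_read (S B : pvD2) (st : pvD2 × pvD2) (p x : String × String) (hne : x ≠ p) :
    (((pvStep S B st p).2.getD x.1 PySem.Dict.empty).get? x.2) =
      ((st.2.getD x.1 PySem.Dict.empty).get? x.2) := by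
  have hpair : ¬(x.1 = p.1 ∧ x.2 = p.2) := by
    rintro ⟨h1, h2⟩; exact hne (Prod.ext h1 h2)
  unfold pvStep
  cases hS : (S.getD p.1 PySem.Dict.empty).get? p.2 <;>
    cases hB : (B.getD p.1 PySem.Dict.empty).get? p.2 <;> simp
  split
  · simp [pv_get2_insert_erase, hpair]
  · rfl

-- A's loop with state-dependent reads = the same loop reading the fixed S, B
theorem pv_foldA (S B : pvD2) :
    ∀ (L : List (String × String)) (st : pvD2 × pvD2), L.Nodup →
      (∀ p ∈ L, (st.1.getD p.1 PySem.Dict.empty).get? p.2 = (S.getD p.1 PySem.Dict.empty).get? p.2) →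
      (∀ p ∈ L, (st.2.getD p.1 PySem.Dict.empty).get? p.2 = (B.getD p.1 PySem.Dict.empty).get? p.2) →
      L.foldl pvStepA st = L.foldl (pvStep S B) st := by
  intro L
  induction L with
  | nil => intros; rfl
  | cons p L ih =>
    intro st hnd hs hb
    have hstep : pvStepA st p = pvStep S B st p := by
      unfold pvStepA pvStep
      rw [hs p (by simp), hb p (by simp)]
      cases (S.getD p.1 PySem.Dict.empty).get? p.2 <;>
        cases (B.getD p.1 PySem.Dict.empty).get? p.2 <;>
        simp [PySem.Dict.modify]
    rw [List.foldl_cons, List.foldl_cons, hstep]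
    have hnotmem := (List.nodup_cons.mp hnd).1
    refine ih (pvStep S B st p) (List.nodup_cons.mp hnd).2 ?_ ?_
    · intro x hx
      have hne : x ≠ p := by rintro rfl; exact hnotmem hx
      rw [pvStep_fst_read S B st p x hne]; exact hs x (by simp [hx])
    · intro x hx
      have hne : x ≠ p := by rintro rfl; exact hnotmem hx
      rw [pvStep_snd_read S B st p x hne]; exact hb x (by simp [hx])

-- B's inner step, reads localized
theorem pvStepB'_snd_read (B : pvD2) (st : pvD2 × pvD2) (t : (String × String) × Int)
    (x : String × String) (hne : x ≠ t.1) :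
    (((pvStepB' B st t).2.getD x.1 PySem.Dict.empty).get? x.2) =
      ((st.2.getD x.1 PySem.Dict.empty).get? x.2) := by
  have hpair : ¬(x.1 = t.1.1 ∧ x.2 = t.1.2) := by
    rintro ⟨h1, h2⟩; exact hne (Prod.ext h1 h2)
  unfold pvStepB'
  cases hB : (B.getD t.1.1 PySem.Dict.empty).get? t.1.2 <;> simp
  split
  · simp [pv_get2_insert_erase, hpair]
  · rfl

-- B's loop with live reads of run_bertcat = the same loop reading the fixed B
theorem pv_foldB (B : pvD2) :
    ∀ (T : List ((String × String) × Int)) (st : pvD2 × pvD2), (T.map Prod.fst).Nodup →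
      (∀ t ∈ T, (st.2.getD t.1.1 PySem.Dict.empty).get? t.1.2 =
        (B.getD t.1.1 PySem.Dict.empty).get? t.1.2) →
      T.foldl (fun st t => pvStepB t.1.1 st (t.1.2, t.2)) st = T.foldl (pvStepB' B) st := by
  intro T
  induction T with
  | nil => intros; rfl
  | cons t T ih =>
    intro st hnd hb
    have hstep : pvStepB t.1.1 st (t.1.2, t.2) = pvStepB' B st t := by
      show (match (st.2.getD t.1.1 PySem.Dict.empty).get? t.1.2 with
        | some rank_bertcat =>
          if t.2 ≤ rank_bertcat then
            (st.1, st.2.insert t.1.1 ((st.2.getD t.1.1 PySem.Dict.empty).erase t.1.2))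
          else (st.1.insert t.1.1 ((st.1.getD t.1.1 PySem.Dict.empty).erase t.1.2), st.2)
        | none => st) = pvStepB' B st t
      rw [hb t (by simp)]
      rfl
    have hnotmem : t.1 ∉ T.map Prod.fst := (List.nodup_cons.mp (by simpa using hnd)).1
    rw [List.foldl_cons, List.foldl_cons, hstep]
    refine ih (pvStepB' B st t) (List.nodup_cons.mp (by simpa using hnd)).2 ?_
    intro x hx
    have hne : x.1 ≠ t.1 := by
      intro h; exact hnotmem (h ▸ List.mem_map_of_mem hx)
    rw [pvStepB'_snd_read B st t x.1 hne]; exact hb x (by simp [hx])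

-- B's fixed-read steps coincide with the common step on the triples of S
theorem pv_foldB' (S B : pvD2) (T : List ((String × String) × Int)) (st : pvD2 × pvD2)
    (hT : ∀ t ∈ T, (S.getD t.1.1 PySem.Dict.empty).get? t.1.2 = some t.2) :
    T.foldl (pvStepB' B) st = (T.map Prod.fst).foldl (pvStep S B) st := by
  rw [List.foldl_map]
  refine (PySem.List.foldl_congr_mem T (pvStepB' B) (fun st t => pvStep S B st t.1) st ?_)
  intro st t ht
  show pvStepB' B st t = pvStep S B st t.1
  unfold pvStepB' pvStep
  rw [hT t ht]
  cases (B.getD t.1.1 PySem.Dict.empty).get? t.1.2 <;> rfl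

-- dropping the elements on which the fold does nothing
theorem pv_foldl_filter {α β : Type} (f : β → α → β) (cond : α → Bool) :
    ∀ (L : List α) (st : β), (∀ (st' : β), ∀ x ∈ L, cond x = false → f st' x = st') →
      L.foldl f st = (L.filter cond).foldl f st := by
  intro L
  induction L with
  | nil => intros; rfl
  | cons x L ih =>
    intro st h
    cases hc : cond x
    · rw [List.foldl_cons, h st x (by simp) hc, List.filter_cons, hc]
      exact ih st (fun st' y hy => h st' y (by simp [hy]))
    · rw [List.foldl_cons, List.filter_cons, hc]
      exact ih (f st x) (fun st' y hy => h st' y (by simp [hy]))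

-- membership in the pair list ↔ a successful nested lookup
theorem pv_mem_pairs_iff (S : pvD2) (hS : S.keys.Nodup)
    (hI : ∀ qv ∈ S.items, qv.2.keys.Nodup) (q d : String) :
    (q, d) ∈ pvPairs S ↔ ((S.getD q PySem.Dict.empty).get? d).isSome := by
  unfold pvPairs
  constructor
  · intro h
    rcases List.mem_flatMap.mp h with ⟨qv, hqv, hmem⟩
    rcases List.mem_map.mp hmem with ⟨dr, hdr, heq⟩
    have h1 : qv.1 = q := congrArg Prod.fst heq
    have h2 : dr.1 = d := congrArg Prod.snd heq
    have hget : S.get? q = some qv.2 := by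
      apply PySem.Dict.get?_of_mem_items _ _ hS
      rw [← h1]; exact hqv
    rw [PySem.Dict.getD_eq_get?_getD, hget]
    have : qv.2.get? d = some dr.2 := by
      apply PySem.Dict.get?_of_mem_items _ _ (hI qv hqv)
      rw [← h2]; exact hdr
    simp [this]
  · intro h
    cases hq : S.get? q with
    | none => rw [PySem.Dict.getD_eq_get?_getD, hq] at h; simp [PySem.Dict.get?_empty] at h
    | some inn =>
      rw [PySem.Dict.getD_eq_get?_getD, hq] at h
      simp only [Option.getD_some] at h
      cases hd : inn.get? d with
      | none => rw [hd] at h; simp at h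
      | some r =>
        refine List.mem_flatMap.mpr ⟨(q, inn), PySem.Dict.mem_items_of_get?_eq_some _ hq, ?_⟩
        exact List.mem_map.mpr ⟨(d, r), PySem.Dict.mem_items_of_get?_eq_some _ hd, rfl⟩

theorem pv_triples_val (S : pvD2) (hS : S.keys.Nodup)
    (hI : ∀ qv ∈ S.items, qv.2.keys.Nodup) :
    ∀ t ∈ pvTriples S, (S.getD t.1.1 PySem.Dict.empty).get? t.1.2 = some t.2 := by
  intro t ht
  rcases List.mem_flatMap.mp ht with ⟨qv, hqv, hmem⟩
  rcases List.mem_map.mp hmem with ⟨dr, hdr, heq⟩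
  have h1 : qv.1 = t.1.1 := congrArg (fun p => p.1.1) heq
  have h2 : dr.1 = t.1.2 := congrArg (fun p => p.1.2) heq
  have h3 : dr.2 = t.2 := congrArg Prod.snd heq
  have hget : S.get? t.1.1 = some qv.2 := by
    apply PySem.Dict.get?_of_mem_items _ _ hS
    rw [← h1]; exact hqv
  rw [PySem.Dict.getD_eq_get?_getD, hget]
  have : qv.2.get? t.1.2 = some dr.2 := by
    apply PySem.Dict.get?_of_mem_items _ _ (hI qv hqv)
    rw [← h2]; exact hdr
  simp [this, h3]

theorem pv_triples_map_fst (S : pvD2) : (pvTriples S).map Prod.fst = pvPairs S := by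
  unfold pvTriples pvPairs
  rw [List.map_flatMap]
  simp only [List.map_map]
  rfl

-- the pair list of a nested dict with unique outer and inner keys has no duplicates
theorem pv_mem_pairs_fst (l : List (String × PySem.Dict String Int)) (a : String × String)
    (ha : a ∈ l.flatMap (fun qv => qv.2.items.map (fun dr => (qv.1, dr.1)))) :
    a.1 ∈ l.map Prod.fst := by
  rcases List.mem_flatMap.mp ha with ⟨qv, hqv, hmem⟩
  rcases List.mem_map.mp hmem with ⟨dr, _, heq⟩
  have : qv.1 = a.1 := congrArg Prod.fst heq
  exact this ▸ List.mem_map_of_mem hqv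

theorem pv_nodup_pairs (l : List (String × PySem.Dict String Int))
    (h1 : (l.map Prod.fst).Nodup) (h2 : ∀ qv ∈ l, qv.2.keys.Nodup) :
    (l.flatMap (fun qv => qv.2.items.map (fun dr => (qv.1, dr.1)))).Nodup := by
  induction l with
  | nil => simp
  | cons qv l ih =>
    simp only [List.flatMap_cons]
    refine List.Nodup.append ?_ (ih (by simpa using (List.nodup_cons.mp h1).2)
      (fun x hx => h2 x (by simp [hx]))) ?_
    · have heq : qv.2.items.map (fun dr => (qv.1, dr.1)) = qv.2.keys.map (fun d => (qv.1, d)) := by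
        simp [PySem.Dict.keys, List.map_map]
      rw [heq]
      exact (h2 qv (by simp)).map (fun a b h => by simpa using congrArg Prod.snd h)
    · intro a ha ha'
      have h1' : qv.1 ∉ l.map Prod.fst := (List.nodup_cons.mp h1).1
      rcases List.mem_map.mp ha with ⟨dr, _, heq⟩
      have : a.1 = qv.1 := (congrArg Prod.fst heq).symm
      exact h1' (this ▸ pv_mem_pairs_fst l a ha')

-- post-cutoff dicts have unique outer and inner keys
theorem pv_cutInner_nodup (c : Int) (l : List (String × Int)) :
    ∀ (i : PySem.Dict String Int), i.keys.Nodup →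
      (l.foldl (fun inn dr => if dr.2 ≤ c then inn.insert dr.1 dr.2 else inn) i).keys.Nodup := by
  induction l with
  | nil => intro i h; exact h
  | cons dr l ih =>
    intro i h
    rw [List.foldl_cons]
    by_cases hc : dr.2 ≤ c
    · rw [if_pos hc]; exact ih _ (PySem.Dict.nodup_keys_insert _ _ _ h)
    · rw [if_neg hc]; exact ih _ h

theorem pv_cut_keys_nodup (run : pvD2) (c : Int) : (pvCutRun run c).keys.Nodup := by
  unfold pvCutRun
  exact PySem.Dict.nodup_keys_foldl_insert_key _ Prod.fst _ _ PySem.Dict.nodup_keys_empty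

theorem pv_foldl_insert_snd (P : PySem.Dict String Int → Prop) {β : Type} (l : List β)
    (key : β → String) (g : β → PySem.Dict String Int) (hg : ∀ x ∈ l, P (g x)) :
    ∀ (a : pvD2), (∀ p ∈ a.items, P p.2) →
      ∀ p ∈ (l.foldl (fun a x => a.insert (key x) (g x)) a).items, P p.2 := by
  induction l with
  | nil => intro a ha; exact ha
  | cons x l ih =>
    intro a ha
    rw [List.foldl_cons]
    refine ih (fun y hy => hg y (by simp [hy])) _ ?_
    intro p hp
    rcases (PySem.Dict.mem_items_insert _ _ _ _).mp hp with h | ⟨h, _⟩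
    · rw [h]; exact hg x (by simp)
    · exact ha p h

theorem pv_cut_inner_nodup (run : pvD2) (c : Int) :
    ∀ qv ∈ (pvCutRun run c).items, qv.2.keys.Nodup := by
  unfold pvCutRun
  exact pv_foldl_insert_snd (fun i => i.keys.Nodup) run.items Prod.fst
    (fun qv => qv.2.items.foldl
      (fun inn dr => if dr.2 ≤ c then inn.insert dr.1 dr.2 else inn) PySem.Dict.empty)
    (fun x _ => pv_cutInner_nodup c x.2.items PySem.Dict.empty PySem.Dict.nodup_keys_empty) _
    (fun p hp => absurd hp (List.not_mem_nil))

-- A's run_cut_off builds the same dict as B's comprehension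
theorem pv_cutoff_inner_shift (c : Int) (q : String) :
    ∀ (l : List (String × Int)) (acc : pvD2) (inn : PySem.Dict String Int),
      l.foldl (fun a dr => if dr.2 ≤ c then a.modify q PySem.Dict.empty (fun i => i.insert dr.1 dr.2) else a)
        (acc.insert q inn)
      = acc.insert q (l.foldl (fun i dr => if dr.2 ≤ c then i.insert dr.1 dr.2 else i) inn) := by
  intro l
  induction l with
  | nil => intros; rfl
  | cons dr l ih =>
    intro acc inn
    rw [List.foldl_cons, List.foldl_cons]
    by_cases h : dr.2 ≤ c
    · rw [if_pos h, if_pos h]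
      rw [show (acc.insert q inn).modify q PySem.Dict.empty (fun i => i.insert dr.1 dr.2)
            = acc.insert q (inn.insert dr.1 dr.2) by
        simp [PySem.Dict.modify, PySem.Dict.getD_insert_self, PySem.Dict.insert_insert_self]]
      exact ih acc (inn.insert dr.1 dr.2)
    · rw [if_neg h, if_neg h]; exact ih acc inn

theorem pv_cutoff_eq (run : pvD2) (c : Int) : run_cut_off run c = pvCutRun run c := by
  unfold run_cut_off pvCutRun
  refine PySem.List.foldl_congr_mem _ _ _ _ ?_
  intro acc qv _
  exact pv_cutoff_inner_shift c qv.1 qv.2.items acc PySem.Dict.empty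

-- A's get_pairs_from_run is the pair list of the run
theorem pv_get_pairs (run : pvD2) : get_pairs_from_run run = pvPairs run := by
  unfold get_pairs_from_run pvPairs
  rw [PySem.List.foldl_congr_mem _ _
    (fun acc qv => acc ++ qv.2.items.map (fun dr => (qv.1, dr.1))) _
    (fun acc qv _ => PySem.List.foldl_append_singleton_eq_map _ _ _)]
  rw [PySem.List.foldl_append_eq_flatMap]
  simp

-- B skips a query absent from run_bertcat without any effect
theorem pv_skip (q : String) : ∀ (l : List (String × Int)) (st : pvD2 × pvD2),
    st.2.get? q = none → l.foldl (pvStepB q) st = st := by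
  intro l
  induction l with
  | nil => intros; rfl
  | cons dr l ih =>
    intro st h
    have hstep : pvStepB q st dr = st := by
      unfold pvStepB
      rw [PySem.Dict.getD_eq_get?_getD, h]
      simp [PySem.Dict.get?_empty]
    rw [List.foldl_cons, hstep]
    exact ih st h

-- B's nested loop is the flat loop over the triples of run_scibert
theorem pv_nested_eq_triples (S : pvD2) (st0 : pvD2 × pvD2) :
    S.items.foldl
      (fun st qdocs =>
        match st.2.get? qdocs.1 with
        | none => st
        | some _ => qdocs.2.items.foldl (pvStepB qdocs.1) st)
      st0
    = (pvTriples S).foldl (fun st t => pvStepB t.1.1 st (t.1.2, t.2)) st0 := by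
  unfold pvTriples
  rw [List.foldl_flatMap]
  refine PySem.List.foldl_congr_mem _ _ _ _ ?_
  intro st qv _
  rw [List.foldl_map]
  have hbody : (fun (st : pvD2 × pvD2) (dr : String × Int) => pvStepB qv.1 st (dr.1, dr.2))
      = pvStepB qv.1 := rfl
  rw [hbody]
  cases h : st.2.get? qv.1 with
  | none => exact (pv_skip qv.1 qv.2.items st h).symm
  | some _ => rfl

-- ===== VERDICT (by name: the statement is the Claim_ definition above) =====
theorem run_intersection_spec : Claim_equal_run_intersection := by
  unfold Claim_equal_run_intersection
  intro rs rb c _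
  simp only [Spec_run_intersection, run_intersection, run_intersection_alt]
  simp only [pv_cutoff_eq, pv_get_pairs]
  set S := pvCutRun (pvRunDict rs) c with hSdef
  set B := pvCutRun (pvRunDict rb) c with hBdef
  have hSk : S.keys.Nodup := pv_cut_keys_nodup _ _
  have hBk : B.keys.Nodup := pv_cut_keys_nodup _ _
  have hSi : ∀ qv ∈ S.items, qv.2.keys.Nodup := pv_cut_inner_nodup _ _
  have hBi : ∀ qv ∈ B.items, qv.2.keys.Nodup := pv_cut_inner_nodup _ _
  have hpS : (pvPairs S).Nodup := pv_nodup_pairs S.items hSk hSi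
  -- A's intersection list is the B-membership filter of S's pair list
  have hinter : PySem.Set.inter (PySem.Set.ofList (pvPairs S)) (PySem.Set.ofList (pvPairs B))
      = (pvPairs S).filter (fun p => (PySem.Set.ofList (pvPairs B)).contains p) := by
    rw [PySem.Set.ofList_eq_self_of_nodup _ hpS]; rfl
  have hcond : ∀ (p : String × String),
      (PySem.Set.ofList (pvPairs B)).contains p = false →
      (B.getD p.1 PySem.Dict.empty).get? p.2 = none := by
    intro p hp
    have hnot : p ∉ pvPairs B := by
      intro hmem
      rw [(PySem.Set.contains_iff _ _).mpr ((PySem.Set.mem_ofList _ _).mpr hmem)] at hp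
      exact Bool.noConfusion hp
    have hni : ¬(((B.getD p.1 PySem.Dict.empty).get? p.2).isSome = true) := fun hh =>
      hnot ((pv_mem_pairs_iff B hBk hBi p.1 p.2).mpr hh)
    cases h : (B.getD p.1 PySem.Dict.empty).get? p.2 with
    | none => rfl
    | some _ => rw [h] at hni; simp at hni
  -- A's main loop
  have hA : (PySem.Set.inter (PySem.Set.ofList (pvPairs S)) (PySem.Set.ofList (pvPairs B))).foldl
        pvStepA (S, B)
      = ((pvPairs S).filter (fun p => (PySem.Set.ofList (pvPairs B)).contains p)).foldl
        (pvStep S B) (S, B) := by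
    rw [hinter]
    exact pv_foldA S B _ (S, B) (hpS.filter _) (fun p _ => rfl) (fun p _ => rfl)
  -- B's main loop
  have hB : S.items.foldl
        (fun st qdocs =>
          match st.2.get? qdocs.1 with
          | none => st
          | some _ => qdocs.2.items.foldl (pvStepB qdocs.1) st)
        (S, B)
      = ((pvPairs S).filter (fun p => (PySem.Set.ofList (pvPairs B)).contains p)).foldl
        (pvStep S B) (S, B) := by
    rw [pv_nested_eq_triples]
    rw [pv_foldB B (pvTriples S) (S, B) (by rw [pv_triples_map_fst]; exact hpS) (fun t _ => rfl)]
    rw [pv_foldB' S B (pvTriples S) (S, B) (pv_triples_val S hSk hSi)]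
    rw [pv_triples_map_fst]
    exact pv_foldl_filter (pvStep S B) _ (pvPairs S) (S, B)
      (fun st' p _ hp => by
        unfold pvStep
        rw [hcond p hp]
        cases (S.getD p.1 PySem.Dict.empty).get? p.2 <;> simp)
  rw [hA, hB]
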